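-- pv_equiv track=rewrite | github.com/waldemarstal/MDP | lib/main.py | direction_of_max_value
-- ===== SOURCE A (Python) =====
-- def direction_of_max_value(direction_with_value):
--     max_v = 0
--     direct = ''
--     for i in direction_with_value:
--         if i[1] < max_v:
--             continue
--         max_v = i[1]
--         direct = i[0]
--     return direct[0]
-- ===== SOURCE B (Python) =====
-- def direction_of_max_value(direction_with_value):
--     # Compute the maximum value first, then take the last pair achieving it
--     # (last-wins, as in A); only values >= 0 can win because A starts at max_v = 0.
--     if direction_with_value:
--         best = max(p[1] for p in direction_with_value)
--         if best >= 0: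
--             for pair in reversed(direction_with_value):
--                 if pair[1] == best:
--                     return pair[0][0]
-- ===== Notes on version B (the rewrite author's own statement) =====
-- stated objective: alternative
-- what changed: B replaces A's single running-max fold carrying (max_v, direct) state by a two-phase algorithm: compute the max of the values first, then scan the list in reverse for the first pair achieving it; Pre_ excludes exactly the inputs where A raises IndexError (no value >= 0, or the winning direction string is empty), where B returns None or raises.
import Mathlib
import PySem

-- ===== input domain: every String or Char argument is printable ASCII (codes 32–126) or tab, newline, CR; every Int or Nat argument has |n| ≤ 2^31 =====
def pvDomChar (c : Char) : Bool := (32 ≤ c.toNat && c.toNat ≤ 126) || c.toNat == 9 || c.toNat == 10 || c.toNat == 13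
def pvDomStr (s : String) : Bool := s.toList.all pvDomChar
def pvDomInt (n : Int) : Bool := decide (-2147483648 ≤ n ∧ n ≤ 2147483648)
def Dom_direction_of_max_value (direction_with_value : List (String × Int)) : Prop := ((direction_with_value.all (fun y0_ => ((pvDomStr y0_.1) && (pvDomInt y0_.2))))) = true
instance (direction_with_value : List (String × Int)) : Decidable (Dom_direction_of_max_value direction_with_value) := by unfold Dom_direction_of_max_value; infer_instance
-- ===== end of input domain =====

-- B replaces A's running-max fold by: compute the max value first, then reverse-scan for the
-- first (i.e. last in original order) pair achieving it. Same return value wherever A returns.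

-- ===== PORT A =====
-- literal transliteration of A: a fold over the list carrying the (max_v, direct) state,
-- then direct[0] (Str.pyGet?; the 'none' arm is Python's IndexError, excluded by Pre_).
def direction_of_max_value (direction_with_value : List (String × Int)) : String :=
  let st := direction_with_value.foldl
    (fun (st : Int × String) i => if i.2 < st.1 then st else (i.2, i.1)) (0, "")
  match PySem.Str.pyGet? st.2 0 with
  | some c => String.ofList [c]
  | none => ""  -- Python A raises IndexError here; outside Pre_

-- ===== PORT B =====
-- literal transliteration of B: emptiness guard, max of the values, reverse find,
-- then pair[0][0] ('none' arms = B returns None / raises, outside Pre_).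
def direction_of_max_value_alt (direction_with_value : List (String × Int)) : String :=
  if direction_with_value = [] then ""
  else
    match PySem.List.max? (direction_with_value.map Prod.snd) (fun x => x) with
    | none => ""
    | some best =>
      if 0 ≤ best then
        match direction_with_value.reverse.find? (fun p => p.2 == best) with
        | none => ""
        | some pair =>
          match PySem.Str.pyGet? pair.1 0 with
          | some c => String.ofList [c]
          | none => ""  -- Python raises IndexError here; outside Pre_
      else ""

-- ===== PRECONDITION & SPEC =====
-- Pre_ = exactly the inputs on which Python A returns normally: there is a last-argmax
-- position i whose value is ≥ 0 (earlier values ≤ it, later values strictly below it)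
-- and whose direction string is nonempty (otherwise direct[0] raises IndexError).
def Pre_direction_of_max_value (direction_with_value : List (String × Int)) : Prop :=
  ∃ i ∈ List.range direction_with_value.length,
    0 ≤ (direction_with_value.getD i ("", 0)).2 ∧
    (direction_with_value.getD i ("", 0)).1 ≠ "" ∧
    ∀ j ∈ List.range direction_with_value.length,
      (j < i → (direction_with_value.getD j ("", 0)).2 ≤ (direction_with_value.getD i ("", 0)).2) ∧
      (i < j → (direction_with_value.getD j ("", 0)).2 < (direction_with_value.getD i ("", 0)).2)
instance (direction_with_value : List (String × Int)) : Decidable (Pre_direction_of_max_value direction_with_value) := by unfold Pre_direction_of_max_value; infer_instance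

def pvWitness_direction_of_max_value : (List (String × Int)) := [("north", 1), ("south", 2)]

def Spec_direction_of_max_value (direction_with_value : List (String × Int)) (out : String) : Prop := out = direction_of_max_value_alt direction_with_value
instance (direction_with_value : List (String × Int)) (out : String) : Decidable (Spec_direction_of_max_value direction_with_value out) := by unfold Spec_direction_of_max_value; infer_instance

-- ===== CLAIM (what is proved, stated in full; the proofs are below) =====
def Claim_equal_direction_of_max_value : Prop := ∀ (direction_with_value : List (String × Int)), Dom_direction_of_max_value direction_with_value → Pre_direction_of_max_value direction_with_value → Spec_direction_of_max_value direction_with_value (direction_of_max_value direction_with_value)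

-- ===== LEMMAS AND PROOFS =====

-- once the running max exceeds every remaining value, A's fold is the identity
theorem foldA_const (t : List (String × Int)) (st : Int × String)
    (h : ∀ p ∈ t, p.2 < st.1) :
    t.foldl (fun (st : Int × String) i => if i.2 < st.1 then st else (i.2, i.1)) st = st := by
  induction t with
  | nil => rfl
  | cons a t ih =>
    simp only [List.foldl_cons]
    rw [if_pos (h a (List.mem_cons_self))]
    exact ih fun p hp => h p (List.mem_cons_of_mem _ hp)

-- A's fold ends at the last argmax, provided the start value does not beat it
theorem foldA_main (l : List (String × Int)) (i : Nat) (hi : i < l.length)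
    (st : Int × String) (hst : st.1 ≤ l[i].2)
    (hmax : ∀ j, (hj : j < l.length) → (j < i → l[j].2 ≤ l[i].2) ∧ (i < j → l[j].2 < l[i].2)) :
    l.foldl (fun (st : Int × String) i => if i.2 < st.1 then st else (i.2, i.1)) st
      = (l[i].2, l[i].1) := by
  induction l generalizing i st with
  | nil => simp at hi
  | cons a t ih =>
    simp only [List.foldl_cons]
    cases i with
    | zero =>
      simp only [List.getElem_cons_zero] at hst hmax ⊢
      rw [if_neg (by omega)]
      apply foldA_const
      intro p hp
      obtain ⟨k, hk, rfl⟩ := List.getElem_of_mem hp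
      have := (hmax (k + 1) (by simpa using Nat.succ_lt_succ hk)).2 (Nat.succ_pos k)
      simpa using this
    | succ k =>
      have hk : k < t.length := by simpa using hi
      have hgi : (a :: t)[k + 1]'hi = t[k] := by simp
      have ha : a.2 ≤ t[k].2 := by
        have := (hmax 0 (by simp)).1 (Nat.succ_pos k)
        simpa using this
      rw [hgi] at hst
      have hnext : ∀ j, (hj : j < t.length) → (j < k → t[j].2 ≤ t[k].2) ∧ (k < j → t[j].2 < t[k].2) := by
        intro j hj
        have := hmax (j + 1) (by simpa using Nat.succ_lt_succ hj)
        constructor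
        · intro hlt
          have := this.1 (by omega)
          simpa using this
        · intro hlt
          have := this.2 (by omega)
          simpa using this
      rw [hgi]
      by_cases hcmp : a.2 < st.1
      · rw [if_pos hcmp]
        exact ih k hk st hst hnext
      · rw [if_neg hcmp]
        exact ih k hk (a.2, a.1) ha hnext

-- B's max of the values is the argmax value
theorem maxB_eq (l : List (String × Int)) (i : Nat) (hi : i < l.length)
    (hmax : ∀ j, (hj : j < l.length) → (j < i → l[j].2 ≤ l[i].2) ∧ (i < j → l[j].2 < l[i].2)) :
    PySem.List.max? (l.map Prod.snd) (fun x => x) = some l[i].2 := by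
  have hne : l.map Prod.snd ≠ [] := by
    intro h
    have h' := congrArg List.length h
    simp only [List.length_map, List.length_nil] at h'
    omega
  obtain ⟨x, t, hxs⟩ : ∃ x t, l.map Prod.snd = x :: t := by
    cases h : l.map Prod.snd with
    | nil => exact absurd h hne
    | cons x t => exact ⟨x, t, rfl⟩
  have hv : PySem.List.max? (l.map Prod.snd) (fun x => x) = some (t.foldl max x) := by
    rw [hxs]; exact PySem.List.max?_id_cons x t
  have hub : ∀ y ∈ l.map Prod.snd, y ≤ l[i].2 := by
    intro y hy
    obtain ⟨p, hp, rfl⟩ := List.mem_map.mp hy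
    obtain ⟨k, hk, rfl⟩ := List.getElem_of_mem hp
    rcases Nat.lt_trichotomy k i with h | h | h
    · exact (hmax k hk).1 h
    · subst h; exact le_refl _
    · exact le_of_lt ((hmax k hk).2 h)
  have hvin : t.foldl max x ∈ l.map Prod.snd := PySem.List.max?_mem hv
  have h1 : t.foldl max x ≤ l[i].2 := hub _ hvin
  have h2 : l[i].2 ≤ t.foldl max x := by
    have := PySem.List.max?_isMax hv
    exact this l[i].2 (List.mem_map.mpr ⟨l[i], List.getElem_mem hi, rfl⟩)
  rw [hv]
  exact congrArg some (le_antisymm h1 h2)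

-- B's reverse find hits the argmax pair
theorem findB_eq (l : List (String × Int)) (i : Nat) (hi : i < l.length)
    (hmax : ∀ j, (hj : j < l.length) → (i < j → l[j].2 < l[i].2)) :
    l.reverse.find? (fun p => p.2 == l[i].2) = some l[i] := by
  have hdecomp : l = l.take i ++ l[i] :: l.drop (i + 1) := by
    conv_lhs => rw [← List.take_append_drop i l]
    congr 1
    exact (List.getElem_cons_drop hi).symm
  have hrev : l.reverse = (l.drop (i + 1)).reverse ++ l[i] :: (l.take i).reverse := by
    conv_lhs => rw [hdecomp]
    simp
  rw [hrev, List.find?_append]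
  have hnone : (l.drop (i + 1)).reverse.find? (fun p => p.2 == l[i].2) = none := by
    rw [List.find?_eq_none]
    intro p hp
    rw [List.mem_reverse] at hp
    obtain ⟨k, hk, rfl⟩ := List.getElem_of_mem hp
    rw [List.getElem_drop]
    have hk' : k < l.length - (i + 1) := by simpa using hk
    have hlt := hmax (i + 1 + k) (by omega) (by omega)
    simp only [beq_iff_eq]
    omega
  rw [hnone]
  simp

-- ===== VERDICT (by name: the statement is the Claim_ definition above) =====
theorem direction_of_max_value_spec : Claim_equal_direction_of_max_value := by
  intro l _ hpre
  obtain ⟨i, hiR, hpos, _, hmax⟩ := hpre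
  rw [List.mem_range] at hiR
  have hmax' : ∀ j, (hj : j < l.length) → (j < i → l[j].2 ≤ l[i].2) ∧ (i < j → l[j].2 < l[i].2) := by
    intro j hj
    have := hmax j (List.mem_range.mpr hj)
    rw [List.getD_eq_getElem l ("", 0) hj, List.getD_eq_getElem l ("", 0) hiR] at this
    exact this
  rw [List.getD_eq_getElem l ("", 0) hiR] at hpos
  unfold Spec_direction_of_max_value direction_of_max_value direction_of_max_value_alt
  have hne : l ≠ [] := by intro h; subst h; simp at hiR
  rw [if_neg hne, maxB_eq l i hiR hmax']
  dsimp only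
  rw [if_pos hpos, findB_eq l i hiR (fun j hj => (hmax' j hj).2)]
  dsimp only
  rw [foldA_main l i hiR (0, "") hpos hmax']
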